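-- pv_equiv track=rewrite | github.com/temur-kh/TCS | Assignment2/fsa_translator.py | __has_disjoint_states
-- ===== SOURCE A (Python) =====
-- def __dfs(cur, path, visited):
--     """
--     Depth-first search in a graph
--     :param cur: a current node in the graph
--     :param path: a dictionary of transitions in the graph
--     :param visited: a dictionary of boolean variables to check visits to the nodes
--     :return: 0
--     """
--     for state in path[cur]:
--         if not visited[state]:
--             visited[state] = True
--             __dfs(state, path, visited)
--
-- def __has_disjoint_states(states, trans):
--     """
--     Check if the FSA has disjoint states using counting of graph components
--     :param trans: a list of transitions of the form tuple(s1>a>s2) where s1 and s2 are states, and a is an alpha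
--     :return: True if the FSA has disjoint states else False
--     """
--     cnt_components = 0
--     path = {state: set() for state in states}
--     visited = {state: False for state in states}
--     for tup in trans:
--         path[tup[0]].add(tup[2])
--         path[tup[2]].add(tup[0])
--     for state in path.keys():
--         if not visited[state]:
--             visited[state] = True
--             __dfs(state, path, visited)
--             cnt_components += 1
--     return cnt_components > 1
-- ===== SOURCE B (Python) =====
-- def __has_disjoint_states(states, trans):
--     """
--     Check if the FSA has disjoint states: propagate a boolean 'reached' label
--     from the first state over the transition list until the fixed point
--     (len(states) rounds suffice) and report True iff some state stays unreached.
--     """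
--     if not states:
--         return False
--     reached = {s: False for s in states}
--     reached[states[0]] = True
--     for _ in range(len(states)):
--         for s1, _, s2 in trans:
--             if reached[s1] and not reached[s2]:
--                 reached[s2] = True
--             if reached[s2] and not reached[s1]:
--                 reached[s1] = True
--     return not all(reached.values())
-- ===== Notes on version B (the rewrite author's own statement) =====
-- stated objective: simpler
-- what changed: Replaces the adjacency-dict build plus recursive per-component DFS count by an iterative fixed-point label propagation: a reached flag spreads from the first state directly over the transition list (len(states) rounds), and the answer is whether any state stays unreached.
import Mathlib
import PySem

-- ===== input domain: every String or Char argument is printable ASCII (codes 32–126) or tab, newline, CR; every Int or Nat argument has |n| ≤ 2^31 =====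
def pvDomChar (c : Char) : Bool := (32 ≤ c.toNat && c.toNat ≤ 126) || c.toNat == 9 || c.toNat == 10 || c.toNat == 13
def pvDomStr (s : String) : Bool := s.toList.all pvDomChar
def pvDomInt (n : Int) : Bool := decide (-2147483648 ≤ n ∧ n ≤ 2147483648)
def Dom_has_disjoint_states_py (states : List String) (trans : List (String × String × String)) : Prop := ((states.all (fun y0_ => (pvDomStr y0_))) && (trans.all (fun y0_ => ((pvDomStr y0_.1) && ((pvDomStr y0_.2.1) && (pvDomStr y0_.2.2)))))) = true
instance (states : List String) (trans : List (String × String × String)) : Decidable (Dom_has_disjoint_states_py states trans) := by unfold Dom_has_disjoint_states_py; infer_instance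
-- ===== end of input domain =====

-- B replaces A's adjacency-dict + recursive DFS component count by an iterative reachability
-- fixed point from the first state (simpler, not faster).

-- ===== PORT A =====
-- A builds an adjacency dict of neighbour sets and counts components with a recursive DFS.
-- Python's recursion is ported with a fuel argument (states.length at each top-level call);
-- on Pre_ the fuel never runs out, since each nested call follows marking a fresh state.
def dfsA (path : PySem.Dict String (PySem.Set String)) :
    Nat → List String → PySem.Dict String Bool → PySem.Dict String Bool
  | _, [], visited => visited
  | 0, _ :: _, visited => visited
  | fuel + 1, st :: rest, visited =>
    if visited.getD st true = false then
      dfsA path (fuel + 1) rest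
        (dfsA path fuel (path.getD st PySem.Set.empty) (visited.insert st true))
    else
      dfsA path (fuel + 1) rest visited
  termination_by fuel l _ => (fuel, l.length)

-- body of 'for tup in trans: path[tup[0]].add(tup[2]); path[tup[2]].add(tup[0])'
def buildStepA (d : PySem.Dict String (PySem.Set String)) (t : String × String × String) :
    PySem.Dict String (PySem.Set String) :=
  (d.modify t.1 PySem.Set.empty (fun s => PySem.Set.add s t.2.2)).modify t.2.2 PySem.Set.empty
    (fun s => PySem.Set.add s t.1)

-- body of 'for state in path.keys(): if not visited[state]: ...'
def stepA (path : PySem.Dict String (PySem.Set String)) (n : Nat)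
    (p : Int × PySem.Dict String Bool) (st : String) : Int × PySem.Dict String Bool :=
  if p.2.getD st true = false then
    (p.1 + 1, dfsA path n (path.getD st PySem.Set.empty) (p.2.insert st true))
  else p

def has_disjoint_states_py (states : List String) (trans : List (String × String × String)) : Bool :=
  let path0 : PySem.Dict String (PySem.Set String) :=
    states.foldl (fun d s => d.insert s PySem.Set.empty) PySem.Dict.empty
  let visited0 : PySem.Dict String Bool :=
    states.foldl (fun d s => d.insert s false) PySem.Dict.empty
  let path := trans.foldl buildStepA path0
  let res := path.keys.foldl (stepA path states.length) ((0 : Int), visited0)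
  decide ((1 : Int) < res.1)

-- ===== PORT B =====
-- one pass of 'for s1, _, s2 in trans: if reached[s1] and not reached[s2]: reached[s2] = True;
--   if reached[s2] and not reached[s1]: reached[s1] = True'
-- (Python's reached[s] raises KeyError on a state missing from the dict; those inputs are
--  outside Pre_, the port reads the dict with default false there)
def passB (trans : List (String × String × String)) (r : PySem.Dict String Bool) :
    PySem.Dict String Bool :=
  trans.foldl (fun r t =>
    let r1 := if r.getD t.1 false && !r.getD t.2.2 false then r.insert t.2.2 true else r
    if r1.getD t.2.2 false && !r1.getD t.1 false then r1.insert t.1 true else r1) r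

def has_disjoint_states_py_alt (states : List String) (trans : List (String × String × String)) : Bool :=
  match states with
  | [] => false
  | s0 :: _ =>
    let reached0 : PySem.Dict String Bool :=
      states.foldl (fun d s => d.insert s false) PySem.Dict.empty
    let reached := (PySem.List.pyRange 0 (states.length : Int) 1).foldl
        (fun r _ => passB trans r) (reached0.insert s0 true)
    !(reached.values.all (fun b => b))

-- ===== PRECONDITION & SPEC =====
-- Pre_ excludes exactly the inputs on which a transition endpoint is not a state:
-- there Python A raises KeyError (path[tup[0]] / path[tup[2]] on a missing key).
def Pre_has_disjoint_states_py (states : List String) (trans : List (String × String × String)) : Prop :=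
  ∀ t ∈ trans, t.1 ∈ states ∧ t.2.2 ∈ states
instance (states : List String) (trans : List (String × String × String)) : Decidable (Pre_has_disjoint_states_py states trans) := by unfold Pre_has_disjoint_states_py; infer_instance

def pvWitness_has_disjoint_states_py : List String × (List (String × String × String)) :=
  (["q0", "q1", "q2"], [("q0", "a", "q1")])

def Spec_has_disjoint_states_py (states : List String) (trans : List (String × String × String)) (out : Bool) : Prop := out = has_disjoint_states_py_alt states trans
instance (states : List String) (trans : List (String × String × String)) (out : Bool) : Decidable (Spec_has_disjoint_states_py states trans out) := by unfold Spec_has_disjoint_states_py; infer_instance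

-- ===== CLAIM (what is proved, stated in full; the proofs are below) =====
def Claim_equal_has_disjoint_states_py : Prop := ∀ (states : List String) (trans : List (String × String × String)), Dom_has_disjoint_states_py states trans → Pre_has_disjoint_states_py states trans → Spec_has_disjoint_states_py states trans (has_disjoint_states_py states trans)

-- ===== LEMMAS AND PROOFS =====

-- number of unvisited states of A's visited dict
def pvUnvis (v : PySem.Dict String Bool) : Nat :=
  v.keys.countP (fun k => !v.getD k true)

lemma pv_countP_flip {l : List String} {p q : String → Bool} {k : String} (hk : k ∈ l)
    (hp : p k = true) (hq : q k = false) (hag : ∀ j ∈ l, j ≠ k → q j = p j) :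
    l.countP q < l.countP p := by
  induction l with
  | nil => cases hk
  | cons x t ih =>
    have hmono : ∀ (u : List String), (∀ j ∈ u, j ∈ x :: t) → u.countP q ≤ u.countP p := by
      intro u hu
      apply List.countP_mono_left
      intro j hj hqj
      by_cases hjk : j = k
      · subst hjk; rw [hq] at hqj; cases hqj
      · rw [hag j (hu j hj) hjk] at hqj; exact hqj
    rcases List.mem_cons.mp hk with rfl | hkt
    · rw [List.countP_cons, List.countP_cons, hp, hq]
      have := hmono t (fun j hj => List.mem_cons_of_mem _ hj)
      rw [if_pos rfl, if_neg (by simp)]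
      omega
    · have hlt : t.countP q < t.countP p :=
        ih hkt (fun j hj hne => hag j (List.mem_cons_of_mem _ hj) hne)
      rw [List.countP_cons, List.countP_cons]
      have hhead : (if q x then 1 else 0) ≤ (if p x then 1 else 0) := by
        by_cases hxk : x = k
        · subst hxk; rw [hp, hq]; simp
        · rw [hag x List.mem_cons_self hxk]
      omega


-- the undirected edge relation of the FSA graph, read off the transition list
def pvEdge (trans : List (String × String × String)) (a b : String) : Prop :=
  ∃ lbl, (a, lbl, b) ∈ trans ∨ (b, lbl, a) ∈ trans

def pvReach (trans : List (String × String × String)) : String → String → Prop :=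
  Relation.ReflTransGen (pvEdge trans)

lemma pv_contains_of_getD_false (v : PySem.Dict String Bool) (k : String)
    (h : v.getD k true = false) : v.contains k = true := by
  rw [PySem.Dict.getD_eq_get?_getD] at h
  rw [PySem.Dict.contains_eq_isSome_get?]
  cases hv : v.get? k with
  | none => rw [hv] at h; simp at h
  | some b => rfl


lemma pv_unvis_insert_lt (v : PySem.Dict String Bool) (k : String)
    (_hnd : v.keys.Nodup) (h : v.getD k true = false) :
    pvUnvis (v.insert k true) < pvUnvis v := by
  have hc := pv_contains_of_getD_false v k h
  have hkeys : (v.insert k true).keys = v.keys := PySem.Dict.keys_insert_of_contains v true hc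
  have hkmem : k ∈ v.keys := (PySem.Dict.contains_iff_mem_keys v k).mp hc
  unfold pvUnvis
  rw [hkeys]
  exact pv_countP_flip hkmem (by rw [h]; rfl)
    (by rw [PySem.Dict.getD_insert_self]; rfl)
    (fun j hj hne => by rw [PySem.Dict.getD_insert_of_ne v true true hne])


lemma pv_unvis_le (v w : PySem.Dict String Bool) (hk : w.keys = v.keys)
    (hm : ∀ k, v.getD k true = true → w.getD k true = true) : pvUnvis w ≤ pvUnvis v := by
  unfold pvUnvis
  rw [hk]
  apply List.countP_mono_left
  intro x _ hwx
  simp only [Bool.not_eq_true'] at hwx ⊢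
  by_contra hvx
  have : v.getD x true = true := by
    cases hb : v.getD x true
    · exact absurd hb hvx
    · rfl
  rw [hm x this] at hwx
  cases hwx


lemma pv_getD_true_of_unvis_zero (v : PySem.Dict String Bool) (h : pvUnvis v = 0)
    (x : String) : v.getD x true = true := by
  by_cases hc : v.contains x = true
  · have hx : x ∈ v.keys := (PySem.Dict.contains_iff_mem_keys v x).mp hc
    have := List.countP_eq_zero.mp h x hx
    simp only [Bool.not_eq_true'] at this
    simpa using this
  · have hc' : v.contains x = false := by
      cases hb : v.contains x
      · rfl
      · exact absurd hb hc
    exact PySem.Dict.getD_of_not_contains v true hc'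


theorem pv_dfsA_spec (path : PySem.Dict String (PySem.Set String)) :
    ∀ (f : Nat) (l : List String) (v : PySem.Dict String Bool),
    v.keys.Nodup → pvUnvis v ≤ f →
    (dfsA path f l v).keys = v.keys ∧
    (∀ k, v.getD k true = true → (dfsA path f l v).getD k true = true) ∧
    (∀ x ∈ l, (dfsA path f l v).getD x true = true) ∧
    (∀ t, (dfsA path f l v).getD t true = true → v.getD t true = false →
      ∀ b ∈ path.getD t PySem.Set.empty, (dfsA path f l v).getD b true = true) := by
  intro f l v
  induction f, l, v using dfsA.induct path with
  | case1 x visited =>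
    intro _ _
    simp only [dfsA]
    refine ⟨?_, fun k hk => hk, ?_,
      fun t ht hvf b hb => by rw [ht] at hvf; cases hvf⟩ <;> simp
  | case2 head tail visited =>
    intro _ hf
    simp only [dfsA]
    have hall : ∀ x, visited.getD x true = true :=
      pv_getD_true_of_unvis_zero visited (Nat.le_zero.mp hf)
    refine ⟨?_, fun k hk => hk, fun x _ => hall x,
      fun t ht hvf b hb => by rw [ht] at hvf; cases hvf⟩
    simp
  | case3 fuel st rest visited hcond ih1 ih2 =>
    intro hnd hf
    simp only [dfsA, if_pos hcond]
    have hcont : visited.contains st = true := pv_contains_of_getD_false visited st hcond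
    have hv1keys : (visited.insert st true).keys = visited.keys :=
      PySem.Dict.keys_insert_of_contains visited true hcont
    have hv1nd : (visited.insert st true).keys.Nodup := by rw [hv1keys]; exact hnd
    have hlt := pv_unvis_insert_lt visited st hnd hcond
    have hf1 : pvUnvis (visited.insert st true) ≤ fuel := by omega
    obtain ⟨hk1, hm1, hl1, hc1⟩ := ih1 hv1nd hf1
    set w1 := dfsA path fuel (path.getD st PySem.Set.empty) (visited.insert st true) with hw1
    have hw1keys : w1.keys = visited.keys := hk1.trans hv1keys
    have hw1nd : w1.keys.Nodup := by rw [hw1keys]; exact hnd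
    have hunv1 : pvUnvis w1 ≤ pvUnvis (visited.insert st true) := pv_unvis_le _ w1 hk1 hm1
    have hf2 : pvUnvis w1 ≤ fuel + 1 := by omega
    obtain ⟨hk2, hm2, hl2, hc2⟩ := ih2 hw1nd hf2
    have hv1mono : ∀ k, visited.getD k true = true →
        (visited.insert st true).getD k true = true := by
      intro k hk
      by_cases hks : k = st
      · subst hks; exact PySem.Dict.getD_insert_self visited k true true
      · rw [PySem.Dict.getD_insert_of_ne visited true true hks]; exact hk
    refine ⟨hk2.trans hw1keys, fun k hk => hm2 k (hm1 k (hv1mono k hk)), ?_, ?_⟩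
    · intro x hx
      rcases List.mem_cons.mp hx with rfl | hxr
      · exact hm2 x (hm1 x (PySem.Dict.getD_insert_self visited x true true))
      · exact hl2 x hxr
    · intro t ht hvf b hb
      by_cases hv1t : (visited.insert st true).getD t true = false
      · by_cases hw1t : w1.getD t true = true
        · exact hm2 b (hc1 t hw1t hv1t b hb)
        · have hw1f : w1.getD t true = false := by
            cases h : w1.getD t true
            · rfl
            · exact absurd h hw1t
          exact hc2 t ht hw1f b hb
      · have hv1t' : (visited.insert st true).getD t true = true := by
          cases h : (visited.insert st true).getD t true
          · exact absurd h hv1t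
          · rfl
        have hts : t = st := by
          by_contra hne
          rw [PySem.Dict.getD_insert_of_ne visited true true hne, hvf] at hv1t'
          cases hv1t'
        subst hts
        exact hm2 b (hl1 b hb)
  | case4 fuel st rest visited hcond ih =>
    intro hnd hf
    have hst : visited.getD st true = true := by
      cases h : visited.getD st true
      · exact absurd h hcond
      · rfl
    obtain ⟨hk, hm, hl, hc⟩ := ih hnd hf
    simp only [dfsA, if_neg hcond]
    refine ⟨hk, hm, ?_, hc⟩
    intro x hx
    rcases List.mem_cons.mp hx with rfl | hxr
    · exact hm x hst
    · exact hl x hxr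


theorem pv_dfsA_sound (path : PySem.Dict String (PySem.Set String)) (R : String → Prop)
    (hR : ∀ a b, R a → b ∈ path.getD a PySem.Set.empty → R b) :
    ∀ (f : Nat) (l : List String) (v : PySem.Dict String Bool),
    (∀ x ∈ l, R x) → (∀ t, v.getD t true = true → v.contains t = true → R t) →
    ∀ t, (dfsA path f l v).getD t true = true → (dfsA path f l v).contains t = true → R t := by
  intro f l v
  induction f, l, v using dfsA.induct path with
  | case1 x visited =>
    intro _ hv
    simp only [dfsA]
    exact hv
  | case2 head tail visited =>
    intro _ hv
    simp only [dfsA]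
    exact hv
  | case3 fuel st rest visited hcond ih1 ih2 =>
    intro hl hv
    simp only [dfsA, if_pos hcond]
    have hRst : R st := hl st List.mem_cons_self
    have hv1 : ∀ t, (visited.insert st true).getD t true = true →
        (visited.insert st true).contains t = true → R t := by
      intro t h1 h2
      by_cases hts : t = st
      · subst hts; exact hRst
      · rw [PySem.Dict.getD_insert_of_ne visited true true hts] at h1
        rw [PySem.Dict.contains_insert] at h2
        have hct : visited.contains t = true := by simpa [hts] using h2
        exact hv t h1 hct
    have hinner : ∀ x ∈ path.getD st PySem.Set.empty, R x := fun x hx => hR st x hRst hx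
    exact ih2 (fun x hx => hl x (List.mem_cons_of_mem _ hx)) (ih1 hinner hv1)
  | case4 fuel st rest visited hcond ih =>
    intro hl hv
    simp only [dfsA, if_neg hcond]
    exact ih (fun x hx => hl x (List.mem_cons_of_mem _ hx)) hv


lemma pv_getD_foldl_insert_const {β : Type} (c d0 : β) :
    ∀ (xs : List String) (d : PySem.Dict String β) (k : String),
    (xs.foldl (fun d s => d.insert s c) d).getD k d0 = if k ∈ xs then c else d.getD k d0 := by
  intro xs
  induction xs with
  | nil => intro d k; simp
  | cons x t ih =>
    intro d k
    rw [List.foldl_cons, ih]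
    by_cases hkt : k ∈ t
    · simp [hkt, List.mem_cons]
    · by_cases hkx : k = x
      · subst hkx
        simp [hkt, PySem.Dict.getD_insert_self]
      · simp only [List.mem_cons, hkt, hkx, or_self, if_false]
        exact PySem.Dict.getD_insert_of_ne d c d0 hkx


lemma pv_keys_foldl_insert_const {β : Type} (c : β) (xs : List String) :
    (xs.foldl (fun d s => d.insert s c) PySem.Dict.empty).keys = PySem.Set.ofList xs := by
  rw [PySem.Dict.keys_foldl_insert xs (fun _ _ => c) PySem.Dict.empty]
  rw [PySem.Dict.keys_empty]
  rw [PySem.Set.ofList_eq_foldl]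
  rfl


lemma pv_buildStep_contains (d : PySem.Dict String (PySem.Set String))
    (t : String × String × String) (x : String) (h : d.contains x = true) :
    (buildStepA d t).contains x = true := by
  unfold buildStepA
  rw [PySem.Dict.contains_modify, PySem.Dict.contains_modify, h]
  simp


lemma pv_build_keys :
    ∀ (ts : List (String × String × String)) (d : PySem.Dict String (PySem.Set String)),
    (∀ t ∈ ts, d.contains t.1 = true ∧ d.contains t.2.2 = true) →
    (ts.foldl buildStepA d).keys = d.keys := by
  intro ts
  induction ts with
  | nil => intro d _; rfl
  | cons t rest ih =>
    intro d hcont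
    rw [List.foldl_cons]
    have h1 := (hcont t List.mem_cons_self).1
    have h2 := (hcont t List.mem_cons_self).2
    have hrest : ∀ u ∈ rest, (buildStepA d t).contains u.1 = true ∧
        (buildStepA d t).contains u.2.2 = true := by
      intro u hu
      exact ⟨pv_buildStep_contains d t u.1 (hcont u (List.mem_cons_of_mem _ hu)).1,
             pv_buildStep_contains d t u.2.2 (hcont u (List.mem_cons_of_mem _ hu)).2⟩
    rw [ih (buildStepA d t) hrest]
    unfold buildStepA
    rw [PySem.Dict.keys_modify, PySem.Dict.keys_insert_of_contains _ _
      (by rw [PySem.Dict.contains_modify, h2]; simp)]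
    rw [PySem.Dict.keys_modify, PySem.Dict.keys_insert_of_contains _ _ h1]


lemma pv_mem_buildStep (d : PySem.Dict String (PySem.Set String)) (t : String × String × String)
    (a b : String) :
    b ∈ (buildStepA d t).getD a PySem.Set.empty ↔
      b ∈ d.getD a PySem.Set.empty ∨ (a = t.1 ∧ b = t.2.2) ∨ (a = t.2.2 ∧ b = t.1) := by
  unfold buildStepA
  simp only [PySem.Dict.getD_modify]
  by_cases h1 : a = t.2.2
  · subst h1
    by_cases h2 : t.2.2 = t.1
    · rw [if_pos rfl, if_pos h2, PySem.Set.mem_add, PySem.Set.mem_add, h2]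
      tauto
    · rw [if_pos rfl, if_neg h2, PySem.Set.mem_add]
      tauto
  · rw [if_neg h1]
    by_cases h2 : a = t.1
    · subst h2
      rw [if_pos rfl, PySem.Set.mem_add]
      tauto
    · rw [if_neg h2]
      tauto

lemma pv_mem_build :
    ∀ (ts : List (String × String × String)) (d : PySem.Dict String (PySem.Set String))
      (a b : String),
    b ∈ (ts.foldl buildStepA d).getD a PySem.Set.empty ↔
      b ∈ d.getD a PySem.Set.empty ∨ pvEdge ts a b := by
  intro ts
  induction ts with
  | nil => intro d a b; simp [pvEdge]
  | cons t rest ih =>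
    intro d a b
    rw [List.foldl_cons, ih, pv_mem_buildStep]
    simp only [pvEdge, List.mem_cons, Prod.ext_iff]
    constructor
    · rintro ((h | (⟨h1, h2⟩ | ⟨h1, h2⟩)) | ⟨lbl, h | h⟩)
      · exact Or.inl h
      · exact Or.inr ⟨t.2.1, Or.inl (Or.inl (by simp [h1, h2]))⟩
      · exact Or.inr ⟨t.2.1, Or.inr (Or.inl (by simp [h1, h2]))⟩
      · exact Or.inr ⟨lbl, Or.inl (Or.inr h)⟩
      · exact Or.inr ⟨lbl, Or.inr (Or.inr h)⟩
    · rintro (h | ⟨lbl, (h | h) | (h | h)⟩)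
      · exact Or.inl (Or.inl h)
      · exact Or.inl (Or.inr (Or.inl (by
          obtain ⟨h1, h2, h3⟩ := h
          exact ⟨h1, h3⟩)))
      · exact Or.inr ⟨lbl, Or.inl h⟩
      · exact Or.inl (Or.inr (Or.inr (by
          obtain ⟨h1, h2, h3⟩ := h
          exact ⟨h3, h1⟩)))
      · exact Or.inr ⟨lbl, Or.inr h⟩


lemma pv_path0_getD (states : List String) (a : String) :
    (states.foldl (fun d s => d.insert s (PySem.Set.empty : PySem.Set String)) (PySem.Dict.empty : PySem.Dict String (PySem.Set String))).getD a
      PySem.Set.empty = PySem.Set.empty := by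
  rw [pv_getD_foldl_insert_const]
  split_ifs
  · rfl
  · exact PySem.Dict.getD_empty _ _


-- main-loop lemmas
lemma pv_loop_fst_ge (path : PySem.Dict String (PySem.Set String)) (n : Nat) :
    ∀ (K : List String) (c : Int) (v : PySem.Dict String Bool),
    c ≤ (K.foldl (stepA path n) (c, v)).1 := by
  intro K
  induction K with
  | nil => intro c v; simp
  | cons k t ih =>
    intro c v
    rw [List.foldl_cons]
    simp only [stepA]
    split_ifs with h
    · exact le_trans (by omega) (ih (c + 1) _)
    · exact ih c v


lemma pv_loop_const (path : PySem.Dict String (PySem.Set String)) (n : Nat) :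
    ∀ (K : List String) (c : Int) (v : PySem.Dict String Bool),
    (∀ s ∈ K, v.getD s true = true) → K.foldl (stepA path n) (c, v) = (c, v) := by
  intro K
  induction K with
  | nil => intro c v _; rfl
  | cons k t ih =>
    intro c v hall
    rw [List.foldl_cons]
    simp only [stepA]
    rw [if_neg (by rw [hall k List.mem_cons_self]; simp)]
    exact ih c v (fun s hs => hall s (List.mem_cons_of_mem _ hs))


lemma pv_loop_gt (path : PySem.Dict String (PySem.Set String)) (n : Nat) :
    ∀ (K : List String) (c : Int) (v : PySem.Dict String Bool) (s : String),
    s ∈ K → v.getD s true = false → c + 1 ≤ (K.foldl (stepA path n) (c, v)).1 := by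
  intro K
  induction K with
  | nil => intro c v s hs _; cases hs
  | cons k t ih =>
    intro c v s hs hsf
    rw [List.foldl_cons]
    simp only [stepA]
    split_ifs with h
    · exact pv_loop_fst_ge path n t (c + 1) _
    · rcases List.mem_cons.mp hs with rfl | hst
      · exact absurd hsf h
      · exact ih c v s hst hsf


-- generic fold/iterate helpers
lemma pv_foldl_extends {α β : Type} (f : List α → β → List α)
    (h : ∀ acc x, ∃ e, f acc x = acc ++ e) :
    ∀ (xs : List β) (acc : List α), ∃ ext, xs.foldl f acc = acc ++ ext := by
  intro xs
  induction xs with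
  | nil => intro acc; exact ⟨[], (List.append_nil acc).symm⟩
  | cons x t ih =>
    intro acc
    obtain ⟨e1, he1⟩ := h acc x
    obtain ⟨e2, he2⟩ := ih (f acc x)
    exact ⟨e1 ++ e2, by rw [List.foldl_cons, he2, he1, List.append_assoc]⟩


lemma pv_add_extends (acc : PySem.Set String) (x : String) :
    ∃ e, PySem.Set.add acc x = acc ++ e := by
  by_cases h : x ∈ acc
  · exact ⟨[], by simp [PySem.Set.add, h]⟩
  · exact ⟨[x], by simp [PySem.Set.add, h]⟩


lemma pv_foldl_const_iterate {α β : Type} (g : α → α) :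
    ∀ (xs : List β) (a : α), xs.foldl (fun r _ => g r) a = g^[xs.length] a := by
  intro xs
  induction xs with
  | nil => intro a; rfl
  | cons x t ih =>
    intro a
    rw [List.foldl_cons, ih, List.length_cons, Function.iterate_succ_apply]


lemma pv_ofList_cons (s0 : String) (rest : List String) :
    ∃ K', PySem.Set.ofList (s0 :: rest) = s0 :: K' := by
  rw [PySem.Set.ofList_eq_foldl, List.foldl_cons]
  obtain ⟨ext, hext⟩ := pv_foldl_extends PySem.Set.add pv_add_extends rest (PySem.Set.add [] s0)
  exact ⟨ext, by rw [hext]; rfl⟩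


lemma pv_foldl_add_len_le :
    ∀ (xs : List String) (acc : PySem.Set String),
    (xs.foldl PySem.Set.add acc).length ≤ acc.length + xs.length := by
  intro xs
  induction xs with
  | nil => intro acc; simp
  | cons x t ih =>
    intro acc
    rw [List.foldl_cons]
    have h1 : (PySem.Set.add acc x).length ≤ acc.length + 1 := by
      by_cases h : x ∈ acc
      · simp [PySem.Set.add, h]
      · simp [PySem.Set.add, h]
    have := ih (PySem.Set.add acc x)
    simp only [List.length_cons]
    omega


lemma pv_ofList_len_le (xs : List String) :
    (PySem.Set.ofList xs).length ≤ xs.length := by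
  rw [PySem.Set.ofList_eq_foldl]
  have := pv_foldl_add_len_le xs []
  simpa using this


-- iterate facts
lemma pv_iterate_stab {α : Type} {g : α → α} {a : α} {j : Nat}
    (h : g^[j + 1] a = g^[j] a) : ∀ m, j ≤ m → g^[m] a = g^[j] a := by
  intro m hm
  induction m, hm using Nat.le_induction with
  | base => rfl
  | succ m hm ih =>
    rw [Function.iterate_succ_apply', ih]
    exact (Function.iterate_succ_apply' g j a).symm.trans h


-- the loop body of passB, named for the proofs
def pvStepB (r : PySem.Dict String Bool) (t : String × String × String) : PySem.Dict String Bool :=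
  let r1 := if r.getD t.1 false && !r.getD t.2.2 false then r.insert t.2.2 true else r
  if r1.getD t.2.2 false && !r1.getD t.1 false then r1.insert t.1 true else r1

lemma pv_passB_eq (ts : List (String × String × String)) (r : PySem.Dict String Bool) :
    passB ts r = ts.foldl pvStepB r := rfl

-- number of unreached states of B's dict
def pvUnvisF (v : PySem.Dict String Bool) : Nat :=
  v.keys.countP (fun k => !v.getD k false)

-- B's initial dict: every state unreached except the first
def pvR0 (s0 : String) (rest : List String) : PySem.Dict String Bool :=
  ((s0 :: rest).foldl (fun d s => d.insert s false) PySem.Dict.empty).insert s0 true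

lemma pv_insert_true_mono (r : PySem.Dict String Bool) (k x : String)
    (h : r.getD x false = true) : (r.insert k true).getD x false = true := by
  by_cases hx : x = k
  · subst hx; exact PySem.Dict.getD_insert_self r x true false
  · rw [PySem.Dict.getD_insert_of_ne r true false hx]; exact h

lemma pv_stepB_mono (r : PySem.Dict String Bool) (t : String × String × String) (x : String)
    (h : r.getD x false = true) : (pvStepB r t).getD x false = true := by
  simp only [pvStepB]
  split_ifs with h1 h2 h2
  all_goals first
    | exact pv_insert_true_mono _ _ _ (pv_insert_true_mono _ _ _ h)
    | exact pv_insert_true_mono _ _ _ h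
    | exact h

lemma pv_passB_mono :
    ∀ (ts : List (String × String × String)) (r : PySem.Dict String Bool) (x : String),
    r.getD x false = true → (ts.foldl pvStepB r).getD x false = true := by
  intro ts
  induction ts with
  | nil => intro r x h; exact h
  | cons t rest ih =>
    intro r x h
    rw [List.foldl_cons]
    exact ih _ x (pv_stepB_mono r t x h)

lemma pv_stepB_fires1 (r : PySem.Dict String Bool) (t : String × String × String)
    (h : r.getD t.1 false = true) : (pvStepB r t).getD t.2.2 false = true := by
  simp only [pvStepB]
  by_cases h2 : r.getD t.2.2 false = true
  · have hc1 : (r.getD t.1 false && !r.getD t.2.2 false) = false := by rw [h, h2]; rfl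
    rw [hc1, if_neg Bool.false_ne_true]
    by_cases h3 : (r.getD t.2.2 false && !r.getD t.1 false) = true
    · rw [if_pos h3]; exact pv_insert_true_mono _ _ _ h2
    · rw [if_neg h3]; exact h2
  · have h2f : r.getD t.2.2 false = false := by
      cases hb : r.getD t.2.2 false
      · rfl
      · exact absurd hb h2
    have hc1 : (r.getD t.1 false && !r.getD t.2.2 false) = true := by rw [h, h2f]; rfl
    rw [if_pos hc1]
    have hM : (r.insert t.2.2 true).getD t.2.2 false = true :=
      PySem.Dict.getD_insert_self r t.2.2 true false
    by_cases h3 : ((r.insert t.2.2 true).getD t.2.2 false &&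
        !(r.insert t.2.2 true).getD t.1 false) = true
    · rw [if_pos h3]; exact pv_insert_true_mono _ _ _ hM
    · rw [if_neg h3]; exact hM

lemma pv_stepB_fires2 (r : PySem.Dict String Bool) (t : String × String × String)
    (h : r.getD t.2.2 false = true) : (pvStepB r t).getD t.1 false = true := by
  simp only [pvStepB]
  by_cases hc1 : (r.getD t.1 false && !r.getD t.2.2 false) = true
  · rw [Bool.and_eq_true, Bool.not_eq_true'] at hc1
    rw [h] at hc1
    cases hc1.2
  · rw [if_neg hc1]
    by_cases h1 : r.getD t.1 false = true
    · have hc2 : (r.getD t.2.2 false && !r.getD t.1 false) = false := by rw [h1]; simp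
      rw [hc2, if_neg Bool.false_ne_true]
      exact h1
    · have h1f : r.getD t.1 false = false := by
        cases hb : r.getD t.1 false
        · rfl
        · exact absurd hb h1
      have hc2 : (r.getD t.2.2 false && !r.getD t.1 false) = true := by rw [h, h1f]; rfl
      rw [if_pos hc2]
      exact PySem.Dict.getD_insert_self r t.1 true false

lemma pv_passB_fires :
    ∀ (ts : List (String × String × String)) (r : PySem.Dict String Bool)
      (t : String × String × String), t ∈ ts →
    (r.getD t.1 false = true → (ts.foldl pvStepB r).getD t.2.2 false = true) ∧
    (r.getD t.2.2 false = true → (ts.foldl pvStepB r).getD t.1 false = true) := by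
  intro ts
  induction ts with
  | nil => intro r t ht; cases ht
  | cons u rest ih =>
    intro r t ht
    rw [List.foldl_cons]
    rcases List.mem_cons.mp ht with rfl | htr
    · exact ⟨fun h => pv_passB_mono rest _ _ (pv_stepB_fires1 r t h),
             fun h => pv_passB_mono rest _ _ (pv_stepB_fires2 r t h)⟩
    · have hih := ih (pvStepB r u) t htr
      exact ⟨fun h => hih.1 (pv_stepB_mono r u _ h), fun h => hih.2 (pv_stepB_mono r u _ h)⟩

lemma pv_stepB_sound (R : String → Prop) (r : PySem.Dict String Bool)
    (t : String × String × String) (h12 : R t.1 → R t.2.2) (h21 : R t.2.2 → R t.1)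
    (hr : ∀ x, r.getD x false = true → R x) :
    ∀ x, (pvStepB r t).getD x false = true → R x := by
  intro x hx
  simp only [pvStepB] at hx
  split_ifs at hx with h1 h2 h2
  · rw [Bool.and_eq_true] at h1
    by_cases hx1 : x = t.1
    · exact hx1 ▸ hr t.1 h1.1
    · rw [PySem.Dict.getD_insert_of_ne _ true false hx1] at hx
      by_cases hx2 : x = t.2.2
      · exact hx2 ▸ h12 (hr t.1 h1.1)
      · rw [PySem.Dict.getD_insert_of_ne _ true false hx2] at hx
        exact hr x hx
  · rw [Bool.and_eq_true] at h1
    by_cases hx2 : x = t.2.2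
    · exact hx2 ▸ h12 (hr t.1 h1.1)
    · rw [PySem.Dict.getD_insert_of_ne _ true false hx2] at hx
      exact hr x hx
  · rw [Bool.and_eq_true] at h2
    by_cases hx1 : x = t.1
    · exact hx1 ▸ h21 (hr t.2.2 h2.1)
    · rw [PySem.Dict.getD_insert_of_ne _ true false hx1] at hx
      exact hr x hx
  · exact hr x hx

lemma pv_passB_sound (R : String → Prop) :
    ∀ (ts : List (String × String × String)) (r : PySem.Dict String Bool),
    (∀ t ∈ ts, (R t.1 → R t.2.2) ∧ (R t.2.2 → R t.1)) →
    (∀ x, r.getD x false = true → R x) →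
    ∀ x, (ts.foldl pvStepB r).getD x false = true → R x := by
  intro ts
  induction ts with
  | nil => intro r _ hr x hx; exact hr x hx
  | cons u rest ih =>
    intro r hts hr x hx
    rw [List.foldl_cons] at hx
    obtain ⟨h12, h21⟩ := hts u List.mem_cons_self
    exact ih (pvStepB r u) (fun t ht => hts t (List.mem_cons_of_mem _ ht))
      (pv_stepB_sound R r u h12 h21 hr) x hx

lemma pv_contains_transfer (r w : PySem.Dict String Bool) (hk : w.keys = r.keys) (x : String)
    (h : r.contains x = true) : w.contains x = true :=
  (PySem.Dict.contains_iff_mem_keys w x).mpr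
    (by rw [hk]; exact (PySem.Dict.contains_iff_mem_keys r x).mp h)

lemma pv_stepB_keys (r : PySem.Dict String Bool) (t : String × String × String)
    (hc1 : r.contains t.1 = true) (hc2 : r.contains t.2.2 = true) :
    (pvStepB r t).keys = r.keys := by
  simp only [pvStepB]
  split_ifs with h1 h2 h2
  · rw [PySem.Dict.keys_insert_of_contains _ _
      (by rw [PySem.Dict.contains_insert, hc1]; simp),
      PySem.Dict.keys_insert_of_contains _ _ hc2]
  · rw [PySem.Dict.keys_insert_of_contains _ _ hc2]
  · rw [PySem.Dict.keys_insert_of_contains _ _ hc1]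
  · rfl

lemma pv_passB_keys :
    ∀ (ts : List (String × String × String)) (r : PySem.Dict String Bool),
    (∀ t ∈ ts, r.contains t.1 = true ∧ r.contains t.2.2 = true) →
    (ts.foldl pvStepB r).keys = r.keys := by
  intro ts
  induction ts with
  | nil => intro r _; rfl
  | cons u rest ih =>
    intro r hcont
    rw [List.foldl_cons]
    have hu := hcont u List.mem_cons_self
    have hk : (pvStepB r u).keys = r.keys := pv_stepB_keys r u hu.1 hu.2
    rw [ih (pvStepB r u) (fun t ht =>
      ⟨pv_contains_transfer r _ hk t.1 (hcont t (List.mem_cons_of_mem _ ht)).1,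
       pv_contains_transfer r _ hk t.2.2 (hcont t (List.mem_cons_of_mem _ ht)).2⟩), hk]

lemma pv_unvisF_le (v w : PySem.Dict String Bool) (hk : w.keys = v.keys)
    (hm : ∀ k, v.getD k false = true → w.getD k false = true) : pvUnvisF w ≤ pvUnvisF v := by
  unfold pvUnvisF
  rw [hk]
  apply List.countP_mono_left
  intro x _ hwx
  simp only [Bool.not_eq_true'] at hwx ⊢
  by_contra hvx
  have hvt : v.getD x false = true := by
    cases hb : v.getD x false
    · exact absurd hb hvx
    · rfl
  rw [hm x hvt] at hwx
  cases hwx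

lemma pv_unvisF_insert_lt (v : PySem.Dict String Bool) (k : String)
    (hc : v.contains k = true) (h : v.getD k false = false) :
    pvUnvisF (v.insert k true) < pvUnvisF v := by
  have hkeys : (v.insert k true).keys = v.keys := PySem.Dict.keys_insert_of_contains v true hc
  have hkmem : k ∈ v.keys := (PySem.Dict.contains_iff_mem_keys v k).mp hc
  unfold pvUnvisF
  rw [hkeys]
  exact pv_countP_flip hkmem (by rw [h]; rfl)
    (by rw [PySem.Dict.getD_insert_self]; rfl)
    (fun j hj hne => by rw [PySem.Dict.getD_insert_of_ne v true false hne])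

lemma pv_stepB_dec (r : PySem.Dict String Bool) (t : String × String × String)
    (hc1 : r.contains t.1 = true) (hc2 : r.contains t.2.2 = true) :
    pvStepB r t = r ∨ pvUnvisF (pvStepB r t) < pvUnvisF r := by
  simp only [pvStepB]
  split_ifs with h1 h2 h2
  · right
    rw [Bool.and_eq_true, Bool.not_eq_true'] at h1 h2
    have hlt1 : pvUnvisF (r.insert t.2.2 true) < pvUnvisF r :=
      pv_unvisF_insert_lt r t.2.2 hc2 h1.2
    have hlt2 : pvUnvisF ((r.insert t.2.2 true).insert t.1 true) <
        pvUnvisF (r.insert t.2.2 true) :=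
      pv_unvisF_insert_lt _ t.1 (by rw [PySem.Dict.contains_insert, hc1]; simp) h2.2
    omega
  · right
    rw [Bool.and_eq_true, Bool.not_eq_true'] at h1
    exact pv_unvisF_insert_lt r t.2.2 hc2 h1.2
  · right
    rw [Bool.and_eq_true, Bool.not_eq_true'] at h2
    exact pv_unvisF_insert_lt r t.1 hc1 h2.2
  · left; rfl

lemma pv_passB_dec :
    ∀ (ts : List (String × String × String)) (r : PySem.Dict String Bool),
    (∀ t ∈ ts, r.contains t.1 = true ∧ r.contains t.2.2 = true) →
    ts.foldl pvStepB r = r ∨ pvUnvisF (ts.foldl pvStepB r) < pvUnvisF r := by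
  intro ts
  induction ts with
  | nil => intro r _; left; rfl
  | cons u rest ih =>
    intro r hcont
    rw [List.foldl_cons]
    have hu := hcont u List.mem_cons_self
    have hk : (pvStepB r u).keys = r.keys := pv_stepB_keys r u hu.1 hu.2
    have hcont' : ∀ t ∈ rest, (pvStepB r u).contains t.1 = true ∧
        (pvStepB r u).contains t.2.2 = true := fun t ht =>
      ⟨pv_contains_transfer r _ hk t.1 (hcont t (List.mem_cons_of_mem _ ht)).1,
       pv_contains_transfer r _ hk t.2.2 (hcont t (List.mem_cons_of_mem _ ht)).2⟩
    rcases pv_stepB_dec r u hu.1 hu.2 with heq | hlt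
    · rw [heq]
      exact ih r (fun t ht => hcont t (List.mem_cons_of_mem _ ht))
    · right
      have hle : pvUnvisF (rest.foldl pvStepB (pvStepB r u)) ≤ pvUnvisF (pvStepB r u) :=
        pv_unvisF_le _ _ (pv_passB_keys rest _ hcont')
          (fun k hk2 => pv_passB_mono rest _ k hk2)
      omega

lemma pv_R0_keys (s0 : String) (rest : List String) :
    (pvR0 s0 rest).keys = PySem.Set.ofList (s0 :: rest) := by
  unfold pvR0
  rw [PySem.Dict.keys_insert_of_contains _ _
    ((PySem.Dict.contains_iff_mem_keys _ _).mpr (by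
      rw [pv_keys_foldl_insert_const]
      exact (PySem.Set.mem_ofList _ _).mpr List.mem_cons_self)),
    pv_keys_foldl_insert_const]

lemma pv_R0_getD (s0 : String) (rest : List String) (x : String) :
    (pvR0 s0 rest).getD x false = true ↔ x = s0 := by
  unfold pvR0
  constructor
  · intro h
    by_contra hne
    rw [PySem.Dict.getD_insert_of_ne _ true false hne, pv_getD_foldl_insert_const] at h
    split_ifs at h
    simp_all [PySem.Dict.getD_empty]
  · intro h
    subst h
    exact PySem.Dict.getD_insert_self _ x true false

lemma pv_iter_keysB (s0 : String) (rest : List String) (trans : List (String × String × String))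
    (hpre : Pre_has_disjoint_states_py (s0 :: rest) trans) :
    ∀ k, ((passB trans)^[k] (pvR0 s0 rest)).keys = PySem.Set.ofList (s0 :: rest) := by
  intro k
  induction k with
  | zero => exact pv_R0_keys s0 rest
  | succ k ih =>
    rw [Function.iterate_succ_apply', pv_passB_eq]
    rw [pv_passB_keys trans _ (fun t ht =>
      ⟨(PySem.Dict.contains_iff_mem_keys _ _).mpr
          (by rw [ih]; exact (PySem.Set.mem_ofList _ _).mpr (hpre t ht).1),
        (PySem.Dict.contains_iff_mem_keys _ _).mpr
          (by rw [ih]; exact (PySem.Set.mem_ofList _ _).mpr (hpre t ht).2)⟩), ih]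

lemma pv_fix_reached (s0 : String) (rest : List String) (trans : List (String × String × String))
    (hpre : Pre_has_disjoint_states_py (s0 :: rest) trans) :
    passB trans ((passB trans)^[(s0 :: rest).length] (pvR0 s0 rest)) =
      (passB trans)^[(s0 :: rest).length] (pvR0 s0 rest) := by
  set n := (s0 :: rest).length with hn
  have hcontk : ∀ k, ∀ t ∈ trans,
      ((passB trans)^[k] (pvR0 s0 rest)).contains t.1 = true ∧
      ((passB trans)^[k] (pvR0 s0 rest)).contains t.2.2 = true := by
    intro k t ht
    constructor
    · exact (PySem.Dict.contains_iff_mem_keys _ _).mpr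
        (by rw [pv_iter_keysB s0 rest trans hpre k]
            exact (PySem.Set.mem_ofList _ _).mpr (hpre t ht).1)
    · exact (PySem.Dict.contains_iff_mem_keys _ _).mpr
        (by rw [pv_iter_keysB s0 rest trans hpre k]
            exact (PySem.Set.mem_ofList _ _).mpr (hpre t ht).2)
  by_contra hne
  have hne2 : (passB trans)^[n + 1] (pvR0 s0 rest) ≠ (passB trans)^[n] (pvR0 s0 rest) := by
    rw [Function.iterate_succ_apply']
    exact hne
  have hne' : ∀ j < n + 1,
      (passB trans)^[j + 1] (pvR0 s0 rest) ≠ (passB trans)^[j] (pvR0 s0 rest) := by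
    intro j hj heq
    have hstab := pv_iterate_stab (g := passB trans) (a := pvR0 s0 rest) (j := j) heq
    have e1 : (passB trans)^[n] (pvR0 s0 rest) = (passB trans)^[j] (pvR0 s0 rest) :=
      hstab n (by omega)
    have e2 : (passB trans)^[n + 1] (pvR0 s0 rest) = (passB trans)^[j] (pvR0 s0 rest) :=
      hstab (n + 1) (by omega)
    exact hne2 (by rw [e2, e1])
  have hdesc : ∀ k, k ≤ n + 1 →
      pvUnvisF ((passB trans)^[k] (pvR0 s0 rest)) + k ≤ pvUnvisF (pvR0 s0 rest) := by
    intro k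
    induction k with
    | zero => intro _; simp only [Function.iterate_zero_apply]; omega
    | succ k ih =>
      intro hk
      have h1 := ih (by omega)
      rcases pv_passB_dec trans ((passB trans)^[k] (pvR0 s0 rest)) (hcontk k) with heq | hlt
      · exfalso
        apply hne' k (by omega)
        rw [Function.iterate_succ_apply', pv_passB_eq]
        exact heq
      · rw [Function.iterate_succ_apply', pv_passB_eq]
        omega
  have hbound : pvUnvisF (pvR0 s0 rest) ≤ n := by
    have h1 : pvUnvisF (pvR0 s0 rest) ≤ (pvR0 s0 rest).keys.length := by
      unfold pvUnvisF; exact List.countP_le_length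
    have h2 : (pvR0 s0 rest).keys.length = (PySem.Set.ofList (s0 :: rest)).length := by
      rw [pv_R0_keys]
    have h3 := pv_ofList_len_le (s0 :: rest)
    omega
  have hfin := hdesc (n + 1) (by omega)
  omega

lemma pv_reached_iff (s0 : String) (rest : List String)
    (trans : List (String × String × String))
    (hpre : Pre_has_disjoint_states_py (s0 :: rest) trans) (t : String) :
    ((passB trans)^[(s0 :: rest).length] (pvR0 s0 rest)).getD t false = true ↔
      pvReach trans s0 t := by
  constructor
  · intro h
    have hgen : ∀ k, ∀ x,
        ((passB trans)^[k] (pvR0 s0 rest)).getD x false = true → pvReach trans s0 x := by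
      intro k
      induction k with
      | zero =>
        intro x hx
        simp only [Function.iterate_zero_apply] at hx
        rw [pv_R0_getD] at hx
        subst hx
        exact Relation.ReflTransGen.refl
      | succ k ih =>
        rw [Function.iterate_succ_apply', pv_passB_eq]
        refine pv_passB_sound (pvReach trans s0) trans _ ?_ ih
        intro u hu
        constructor
        · intro h1
          exact Relation.ReflTransGen.tail h1 ⟨u.2.1, Or.inl (by simpa using hu)⟩
        · intro h2
          exact Relation.ReflTransGen.tail h2 ⟨u.2.1, Or.inr (by simpa using hu)⟩
    exact hgen (s0 :: rest).length t h
  · intro h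
    have hfix := pv_fix_reached s0 rest trans hpre
    have hmonoI : ∀ x,
        (pvR0 s0 rest).getD x false = true →
        ((passB trans)^[(s0 :: rest).length] (pvR0 s0 rest)).getD x false = true := by
      intro x hx
      induction (s0 :: rest).length with
      | zero => exact hx
      | succ k ih =>
        rw [Function.iterate_succ_apply', pv_passB_eq]
        exact pv_passB_mono trans _ x ih
    unfold pvReach at h
    induction h with
    | refl => exact hmonoI s0 ((pv_R0_getD s0 rest s0).mpr rfl)
    | @tail b c hab hedge ih =>
      obtain ⟨lbl, hl | hl⟩ := hedge
      · have hc := (pv_passB_fires trans ((passB trans)^[(s0 :: rest).length] (pvR0 s0 rest))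
          (b, lbl, c) hl).1 ih
        rw [← pv_passB_eq, hfix] at hc
        exact hc
      · have hc := (pv_passB_fires trans ((passB trans)^[(s0 :: rest).length] (pvR0 s0 rest))
          (c, lbl, b) hl).2 ih
        rw [← pv_passB_eq, hfix] at hc
        exact hc

lemma pv_B_iff (s0 : String) (rest : List String) (trans : List (String × String × String))
    (hpre : Pre_has_disjoint_states_py (s0 :: rest) trans) :
    has_disjoint_states_py_alt (s0 :: rest) trans = true ↔
      ∃ s ∈ s0 :: rest, ¬ pvReach trans s0 s := by
  simp only [has_disjoint_states_py_alt]
  rw [pv_foldl_const_iterate]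
  have hlen : (PySem.List.pyRange 0 (((s0 :: rest).length : Nat) : Int) 1).length
      = (s0 :: rest).length := by
    rw [PySem.List.pyRange_zero_natCast]; simp
  rw [hlen]
  rw [show ((s0 :: rest).foldl (fun d s => d.insert s false) PySem.Dict.empty).insert s0 true
      = pvR0 s0 rest from rfl]
  have hkeys : ((passB trans)^[(s0 :: rest).length] (pvR0 s0 rest)).keys
      = PySem.Set.ofList (s0 :: rest) := pv_iter_keysB s0 rest trans hpre _
  have hnd : ((passB trans)^[(s0 :: rest).length] (pvR0 s0 rest)).keys.Nodup := by
    rw [hkeys]; exact PySem.Set.nodup_ofList _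
  rw [PySem.Dict.values_eq_map_keys _ hnd false, List.all_map]
  constructor
  · intro h
    have hfalse : ((passB trans)^[(s0 :: rest).length] (pvR0 s0 rest)).keys.all
        ((fun b => b) ∘ fun k =>
          ((passB trans)^[(s0 :: rest).length] (pvR0 s0 rest)).getD k false) = false := by
      cases hb : ((passB trans)^[(s0 :: rest).length] (pvR0 s0 rest)).keys.all
          ((fun b => b) ∘ fun k =>
            ((passB trans)^[(s0 :: rest).length] (pvR0 s0 rest)).getD k false)
      · rfl
      · rw [hb] at h; cases h
    have hex : ∃ k ∈ ((passB trans)^[(s0 :: rest).length] (pvR0 s0 rest)).keys,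
        ((passB trans)^[(s0 :: rest).length] (pvR0 s0 rest)).getD k false = false := by
      by_contra hall
      push Not at hall
      have : ((passB trans)^[(s0 :: rest).length] (pvR0 s0 rest)).keys.all
          ((fun b => b) ∘ fun k =>
            ((passB trans)^[(s0 :: rest).length] (pvR0 s0 rest)).getD k false) = true := by
        rw [List.all_eq_true]
        intro k hk
        simp only [Function.comp]
        cases hb : ((passB trans)^[(s0 :: rest).length] (pvR0 s0 rest)).getD k false
        · exact absurd hb (hall k hk)
        · rfl
      rw [this] at hfalse
      cases hfalse
    obtain ⟨k, hk, hkf⟩ := hex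
    refine ⟨k, by rw [hkeys] at hk; exact (PySem.Set.mem_ofList _ _).mp hk, ?_⟩
    intro hr
    rw [(pv_reached_iff s0 rest trans hpre k).mpr hr] at hkf
    cases hkf
  · rintro ⟨s, hs, hnr⟩
    have hsf : ((passB trans)^[(s0 :: rest).length] (pvR0 s0 rest)).getD s false = false := by
      cases hb : ((passB trans)^[(s0 :: rest).length] (pvR0 s0 rest)).getD s false
      · rfl
      · exact absurd ((pv_reached_iff s0 rest trans hpre s).mp hb) hnr
    have hall : ((passB trans)^[(s0 :: rest).length] (pvR0 s0 rest)).keys.all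
        ((fun b => b) ∘ fun k =>
          ((passB trans)^[(s0 :: rest).length] (pvR0 s0 rest)).getD k false) = false := by
      cases hb : ((passB trans)^[(s0 :: rest).length] (pvR0 s0 rest)).keys.all
          ((fun b => b) ∘ fun k =>
            ((passB trans)^[(s0 :: rest).length] (pvR0 s0 rest)).getD k false)
      · rfl
      · exfalso
        have hmem := List.all_eq_true.mp hb s
          (by rw [hkeys]; exact (PySem.Set.mem_ofList _ _).mpr hs)
        simp only [Function.comp] at hmem
        rw [hsf] at hmem
        cases hmem
    rw [hall]
    rfl

lemma pv_A_iff (s0 : String) (rest : List String) (trans : List (String × String × String))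
    (hpre : Pre_has_disjoint_states_py (s0 :: rest) trans) :
    has_disjoint_states_py (s0 :: rest) trans = true ↔
      ∃ s ∈ s0 :: rest, ¬ pvReach trans s0 s := by
  have hs0 : s0 ∈ s0 :: rest := List.mem_cons_self
  simp only [has_disjoint_states_py]
  set path0 := (s0 :: rest).foldl (fun d s => d.insert s PySem.Set.empty) PySem.Dict.empty with hpath0
  set visited0 := (s0 :: rest).foldl (fun d s => d.insert s false) PySem.Dict.empty with hvis0
  set path := trans.foldl buildStepA path0 with hpath
  set n := (s0 :: rest).length with hn
  have hkeys0 : path0.keys = PySem.Set.ofList (s0 :: rest) := pv_keys_foldl_insert_const _ _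
  have hcont0 : ∀ x, x ∈ s0 :: rest → path0.contains x = true := fun x hx =>
    (PySem.Dict.contains_iff_mem_keys _ _).mpr
      (by rw [hkeys0]; exact (PySem.Set.mem_ofList _ _).mpr hx)
  have hkeys : path.keys = PySem.Set.ofList (s0 :: rest) := by
    rw [hpath, pv_build_keys trans path0
      (fun t ht => ⟨hcont0 _ (hpre t ht).1, hcont0 _ (hpre t ht).2⟩), hkeys0]
  have hvkeys : visited0.keys = PySem.Set.ofList (s0 :: rest) := pv_keys_foldl_insert_const _ _
  have hvnd : visited0.keys.Nodup := by rw [hvkeys]; exact PySem.Set.nodup_ofList _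
  have hvget : ∀ k, visited0.getD k true = (if k ∈ s0 :: rest then false else true) := by
    intro k
    rw [hvis0, pv_getD_foldl_insert_const]
    split_ifs <;> simp [PySem.Dict.getD_empty]
  have hp0 : ∀ a, path0.getD a PySem.Set.empty = PySem.Set.empty := fun a => by
    rw [hpath0]; exact pv_path0_getD _ a
  have hedge : ∀ a b, (b ∈ path.getD a PySem.Set.empty) ↔ pvEdge trans a b := by
    intro a b
    rw [hpath, pv_mem_build trans path0 a b, hp0 a]
    constructor
    · rintro (h | h)
      · cases h
      · exact h
    · exact fun h => Or.inr h
  have hreach : ∀ t,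
      Relation.ReflTransGen (fun a b => b ∈ path.getD a PySem.Set.empty) s0 t ↔
        pvReach trans s0 t := by
    intro t
    constructor
    · exact Relation.ReflTransGen.mono (fun a b h => (hedge a b).mp h)
    · exact Relation.ReflTransGen.mono (fun a b h => (hedge a b).mpr h)
  have hcontv0 : visited0.contains s0 = true :=
    (PySem.Dict.contains_iff_mem_keys _ _).mpr
      (by rw [hvkeys]; exact (PySem.Set.mem_ofList _ _).mpr hs0)
  set v1 := visited0.insert s0 true with hv1
  set w := dfsA path n (path.getD s0 PySem.Set.empty) v1 with hw
  have hv1keys : v1.keys = visited0.keys := PySem.Dict.keys_insert_of_contains visited0 true hcontv0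
  have hv1nd : v1.keys.Nodup := by rw [hv1keys]; exact hvnd
  have hunv : pvUnvis v1 ≤ n := by
    have h1 : pvUnvis v1 ≤ v1.keys.length := by
      unfold pvUnvis; exact List.countP_le_length
    have h2 : v1.keys.length = (PySem.Set.ofList (s0 :: rest)).length := by rw [hv1keys, hvkeys]
    have h3 := pv_ofList_len_le (s0 :: rest)
    omega
  obtain ⟨hwk, hwm, hwl, hwc⟩ := pv_dfsA_spec path n (path.getD s0 PySem.Set.empty) v1 hv1nd hunv
  rw [← hw] at hwk hwm hwl hwc
  have hwkeys : w.keys = PySem.Set.ofList (s0 :: rest) := by rw [hwk, hv1keys, hvkeys]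
  have hv1s0 : v1.getD s0 true = true := by
    rw [hv1]; exact PySem.Dict.getD_insert_self visited0 s0 true true
  have hmark : ∀ t, pvReach trans s0 t → w.getD t true = true := by
    intro t ht
    rw [← hreach t] at ht
    induction ht with
    | refl => exact hwm s0 hv1s0
    | @tail b c hab hbc ih =>
      by_cases hv1b : v1.getD b true = false
      · exact hwc b ih hv1b c hbc
      · have hv1b' : v1.getD b true = true := by
          cases h : v1.getD b true
          · exact absurd h hv1b
          · rfl
        by_cases hbs : b = s0
        · subst hbs; exact hwl c hbc
        · rw [hv1, PySem.Dict.getD_insert_of_ne visited0 true true hbs, hvget b] at hv1b'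
          by_cases hbmem : b ∈ s0 :: rest
          · rw [if_pos hbmem] at hv1b'; cases hv1b'
          · exfalso
            obtain ⟨lbl, hl | hl⟩ := (hedge b c).mp hbc
            · exact hbmem (hpre _ hl).1
            · exact hbmem (hpre _ hl).2
  have hchar : ∀ k, (w.getD k true = false) ↔ (k ∈ s0 :: rest ∧ ¬ pvReach trans s0 k) := by
    intro k
    constructor
    · intro hkf
      have hkmem : k ∈ s0 :: rest := by
        by_contra hkn
        have hc : w.contains k = false := by
          cases h : w.contains k
          · rfl
          · exact absurd (by
              have hmem := (PySem.Dict.contains_iff_mem_keys w k).mp h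
              rw [hwkeys] at hmem
              exact (PySem.Set.mem_ofList _ _).mp hmem) hkn
        rw [PySem.Dict.getD_of_not_contains w true hc] at hkf
        cases hkf
      refine ⟨hkmem, ?_⟩
      intro hr
      rw [hmark k hr] at hkf
      cases hkf
    · rintro ⟨hkmem, hnr⟩
      cases h : w.getD k true
      · rfl
      · exfalso
        apply hnr
        rw [← hreach k]
        have hcw : w.contains k = true :=
          (PySem.Dict.contains_iff_mem_keys w k).mpr
            (by rw [hwkeys]; exact (PySem.Set.mem_ofList _ _).mpr hkmem)
        refine pv_dfsA_sound path
          (Relation.ReflTransGen (fun a b => b ∈ path.getD a PySem.Set.empty) s0)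
          (fun a b hra hb => hra.tail hb) n (path.getD s0 PySem.Set.empty) v1
          (fun x hx => Relation.ReflTransGen.single hx) ?_ k (by rw [← hw] at *; exact h) (by rw [← hw] at *; exact hcw)
        intro t h1 h2
        by_cases hts : t = s0
        · subst hts; exact Relation.ReflTransGen.refl
        · exfalso
          rw [hv1, PySem.Dict.getD_insert_of_ne visited0 true true hts, hvget t] at h1
          have htmem : t ∈ s0 :: rest := by
            rw [hv1, PySem.Dict.contains_insert] at h2
            have hct : visited0.contains t = true := by simpa [hts] using h2
            have := (PySem.Dict.contains_iff_mem_keys _ _).mp hct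
            rw [hvkeys] at this
            exact (PySem.Set.mem_ofList _ _).mp this
          rw [if_pos htmem] at h1
          cases h1
  obtain ⟨K', hK'⟩ := pv_ofList_cons s0 rest
  have hKeq : path.keys = s0 :: K' := by rw [hkeys, hK']
  rw [hKeq, List.foldl_cons]
  have hstep1 : stepA path n ((0 : Int), visited0) s0 = (1, w) := by
    simp only [stepA]
    rw [if_pos (by rw [hvget s0, if_pos hs0])]
    rw [hw, hv1]
    norm_num
  rw [hstep1, decide_eq_true_iff]
  constructor
  · intro hgt
    by_contra hne
    push Not at hne
    have hall : ∀ s ∈ K', w.getD s true = true := by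
      intro s hsK
      have hsmem : s ∈ s0 :: rest := by
        have hmem : s ∈ path.keys := by rw [hKeq]; exact List.mem_cons_of_mem _ hsK
        rw [hkeys] at hmem
        exact (PySem.Set.mem_ofList _ _).mp hmem
      cases h : w.getD s true
      · exact absurd (hne s hsmem) ((hchar s).mp h).2.elim
      · rfl
    rw [pv_loop_const path n K' 1 w hall] at hgt
    exact absurd hgt (by norm_num)
  · rintro ⟨s, hsmem, hsr⟩
    have hss0 : s ≠ s0 := fun h => hsr (h ▸ Relation.ReflTransGen.refl)
    have hsK : s ∈ K' := by
      have hmem : s ∈ path.keys := by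
        rw [hkeys]; exact (PySem.Set.mem_ofList _ _).mpr hsmem
      rw [hKeq] at hmem
      rcases List.mem_cons.mp hmem with h | h
      · exact absurd h hss0
      · exact h
    have hsf : w.getD s true = false := (hchar s).mpr ⟨hsmem, hsr⟩
    have hge := pv_loop_gt path n K' 1 w s hsK hsf
    omega


-- ===== VERDICT (by name: the statement is the Claim_ definition above) =====
theorem has_disjoint_states_py_spec : Claim_equal_has_disjoint_states_py := by
  intro states trans _hdom hpre
  unfold Spec_has_disjoint_states_py
  cases states with
  | nil =>
    have htr : trans = [] := by
      cases trans with
      | nil => rfl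
      | cons t ts => exact absurd (hpre t (List.mem_cons_self)).1 (List.not_mem_nil)
    subst htr
    rfl
  | cons s0 rest =>
    rw [Bool.eq_iff_iff, pv_A_iff s0 rest trans hpre, pv_B_iff s0 rest trans hpre]
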